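-- pv_equiv track=rewrite | github.com/ncssar/radiolog | caltopo_python.py | _getNextAvailableSuffix
-- ===== SOURCE A (Python) =====
-- def _getNextAvailableSuffix(usedSuffixList: list) -> int:
--     """Get the next available suffix, give a list of used suffixes.\n
--     In case the used suffix list is not contiguous, e.g. if an intermediate suffixed feature has been deleted, the lowest available suffix number will be returned.
--
--     :param usedSuffixList: List of integer suffixes that are already used; does not need to be contiguous
--     :type usedSuffixList: list
--     :return: Lowest available suffix number
--     :rtype: int
--     """
--     keepLooking=True
--     suffix=1
--     while keepLooking and suffix<100:
--         if suffix not in usedSuffixList: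
--             keepLooking=False
--         else:
--             suffix+=1
--     return suffix
-- ===== SOURCE B (Python) =====
-- def _getNextAvailableSuffix(usedSuffixList: list) -> int:
--     available = set(range(1, 100)) - set(usedSuffixList)
--     return min(available, default=100)
-- ===== Notes on version B (the rewrite author's own statement) =====
-- stated objective: simpler
-- what changed: Replaces the sequential probe loop (test 1,2,3,... with a linear membership scan each step) by set algebra: build the complement set(range(1,100)) - set(usedSuffixList) once and take its minimum with default 100.
import Mathlib
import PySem

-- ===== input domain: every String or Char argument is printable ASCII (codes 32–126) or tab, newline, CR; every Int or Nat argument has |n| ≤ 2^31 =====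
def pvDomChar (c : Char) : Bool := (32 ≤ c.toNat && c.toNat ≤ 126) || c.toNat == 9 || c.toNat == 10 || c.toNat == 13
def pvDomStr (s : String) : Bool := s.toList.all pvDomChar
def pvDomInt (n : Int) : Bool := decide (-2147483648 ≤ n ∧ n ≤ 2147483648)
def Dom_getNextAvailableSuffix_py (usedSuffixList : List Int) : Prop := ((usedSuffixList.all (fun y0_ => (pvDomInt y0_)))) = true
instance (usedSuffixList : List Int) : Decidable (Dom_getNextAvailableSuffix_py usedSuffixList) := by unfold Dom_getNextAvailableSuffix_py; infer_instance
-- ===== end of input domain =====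

-- B replaces A's sequential probe loop by set algebra (complement of the used set over 1..99, then min with default 100); objective: simpler.

-- ===== PORT A =====
-- while keepLooking and suffix<100: probe suffix, else suffix+=1.  Fuel 99 covers suffix=1..99;
-- when fuel runs out suffix=100 and the while-condition is false, so returning suffix is exact.
def pvLoopA (usedSuffixList : List Int) (suffix : Int) : Nat → Int
  | 0 => suffix
  | n+1 =>
    if suffix < 100 then
      if usedSuffixList.contains suffix then pvLoopA usedSuffixList (suffix + 1) n
      else suffix
    else suffix

def getNextAvailableSuffix_py (usedSuffixList : List Int) : Int :=
  pvLoopA usedSuffixList 1 99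

-- ===== PORT B =====
-- set(range(1,100)) - set(usedSuffixList): range(1,100) is duplicate-free, so the difference set's
-- elements are exactly the filtered range; min(available, default=100) is order-independent.
def getNextAvailableSuffix_py_alt (usedSuffixList : List Int) : Int :=
  let available := (PySem.List.pyRange 1 100 1).filter (fun s => !usedSuffixList.contains s)
  match available.min? with
  | some m => m
  | none => 100

-- ===== PRECONDITION & SPEC =====
def Spec_getNextAvailableSuffix_py (usedSuffixList : List Int) (out : Int) : Prop := out = getNextAvailableSuffix_py_alt usedSuffixList
instance (usedSuffixList : List Int) (out : Int) : Decidable (Spec_getNextAvailableSuffix_py usedSuffixList out) := by unfold Spec_getNextAvailableSuffix_py; infer_instance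

-- ===== CLAIM (what is proved, stated in full; the proofs are below) =====
def Claim_equal_getNextAvailableSuffix_py : Prop := ∀ (usedSuffixList : List Int), Dom_getNextAvailableSuffix_py usedSuffixList → Spec_getNextAvailableSuffix_py usedSuffixList (getNextAvailableSuffix_py usedSuffixList)

-- ===== LEMMAS AND PROOFS =====

theorem pvLoopA_eq_min (used : List Int) :
    ∀ (f : Nat) (s : Int), s + f = 100 →
      pvLoopA used s f =
        (match ((PySem.List.pyRange s 100 1).filter (fun x => !used.contains x)).min? with
         | some m => m
         | none => 100) := by
  intro f
  induction f with
  | zero =>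
    intro s hs
    have hs' : s = 100 := by omega
    subst hs'
    simp [pvLoopA, PySem.List.pyRange_one_eq_nil (by omega : (100:Int) ≤ 100)]
  | succ n ih =>
    intro s hs
    have hlt : s < 100 := by omega
    by_cases hm : s ∈ used
    · have hA : pvLoopA used s (n+1) = pvLoopA used (s+1) n := by
        simp [pvLoopA, hlt, hm]
      rw [hA, ih (s+1) (by omega), PySem.List.pyRange_one_cons hlt]
      simp [List.filter_cons, hm]
    · have hA : pvLoopA used s (n+1) = s := by
        simp [pvLoopA, hlt, hm]
      have hmin : ((s :: (PySem.List.pyRange (s+1) 100 1).filter (fun x => !used.contains x)).min?) = some s := by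
        apply List.min?_eq_some_iff.mpr
        refine ⟨List.mem_cons_self, ?_⟩
        intro b hb
        rcases List.mem_cons.mp hb with h | h
        · omega
        · have := (PySem.List.mem_pyRange_one).mp (List.mem_filter.mp h).1
          omega
      rw [hA, PySem.List.pyRange_one_cons hlt]
      simp only [List.filter_cons]
      simp only [show (!used.contains s) = true by simp [hm], if_true]
      rw [hmin]

-- ===== VERDICT (by name: the statement is the Claim_ definition above) =====
theorem getNextAvailableSuffix_py_spec : Claim_equal_getNextAvailableSuffix_py := by
  intro used _
  unfold Spec_getNextAvailableSuffix_py getNextAvailableSuffix_py getNextAvailableSuffix_py_alt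
  exact pvLoopA_eq_min used 99 1 (by omega)
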